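-- pv_equiv track=rewrite | github.com/jdeeburke/aoc2024 | python/2/partTwo.py | is_ascending
-- ===== SOURCE A (Python) =====
-- def is_ascending(numbers, used_exception=False):
--     for idx, (a, b) in enumerate(zip(numbers, numbers[1:])):
--         if a >= b or b > a + 3:
--             if used_exception: return False
--
--             list_a = numbers.copy()
--             del list_a[idx]
--
--             list_b = numbers.copy()
--             del list_b[idx+1]
--
--             return is_ascending(list_a, True) or is_ascending(list_b, True)
--
--     return True
-- ===== SOURCE B (Python) =====
-- def is_ascending(numbers, used_exception=False):
--     def ok(seq):
--         return all(a < b <= a + 3 for a, b in zip(seq, seq[1:]))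
--     if used_exception:
--         return ok(numbers)
--     if ok(numbers):
--         return True
--     return any(ok(numbers[:i] + numbers[i + 1:]) for i in range(len(numbers)))
-- ===== Notes on version B (the rewrite author's own statement) =====
-- stated objective: simpler
-- what changed: Replaces A's first-violation recursion (find the first bad pair, recurse on the two lists with one endpoint deleted) by a flat strict check plus a scan trying every single-element deletion; equivalence rests on the lemma that a deletion away from the first bad pair leaves it adjacent.
import Mathlib
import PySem

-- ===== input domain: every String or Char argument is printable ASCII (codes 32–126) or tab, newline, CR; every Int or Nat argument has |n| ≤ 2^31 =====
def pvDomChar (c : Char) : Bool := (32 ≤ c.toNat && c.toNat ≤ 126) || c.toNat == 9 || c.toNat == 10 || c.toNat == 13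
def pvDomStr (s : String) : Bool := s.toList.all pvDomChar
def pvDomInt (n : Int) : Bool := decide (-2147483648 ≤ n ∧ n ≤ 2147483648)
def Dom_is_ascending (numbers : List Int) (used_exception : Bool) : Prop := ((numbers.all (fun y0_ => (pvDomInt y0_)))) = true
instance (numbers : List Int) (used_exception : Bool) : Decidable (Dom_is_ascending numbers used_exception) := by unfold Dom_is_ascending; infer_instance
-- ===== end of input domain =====

-- B replaces A's first-violation recursion by a flat check plus a scan over all single-element
-- deletions (objective: simpler); return value only, A does not mutate its argument.

-- ===== PORT A =====
-- A's loop over enumerate(zip(numbers, numbers[1:])): index of the first violating pair, if any.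
def pvFirstBad : List Int → Option Nat
  | [] => none
  | [_] => none
  | a :: b :: t => if decide (a ≥ b) || decide (b > a + 3) then some 0
                   else (pvFirstBad (b :: t)).map (· + 1)

-- termination fact for the recursive calls of is_ascending (cited in decreasing_by)
theorem pvFirstBad_lt : ∀ {xs : List Int} {idx : Nat}, pvFirstBad xs = some idx → idx + 1 < xs.length := by
  intro xs
  induction xs with
  | nil => intro idx h; simp [pvFirstBad] at h
  | cons a xs ih =>
    cases xs with
    | nil => intro idx h; simp [pvFirstBad] at h
    | cons b t =>
      intro idx h
      simp only [pvFirstBad] at h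
      split at h
      · simp at h; simp; omega
      · simp [Option.map_eq_some_iff] at h
        obtain ⟨j, hj, rfl⟩ := h
        have := ih hj
        simp at this ⊢; omega

def is_ascending (numbers : List Int) (used_exception : Bool) : Bool :=
  match h : pvFirstBad numbers with
  | none => true
  | some idx =>
    if used_exception then false
    else is_ascending (numbers.eraseIdx idx) true || is_ascending (numbers.eraseIdx (idx + 1)) true
termination_by numbers.length
decreasing_by
  · have := pvFirstBad_lt h
    rw [List.length_eraseIdx, if_pos (by omega)]; omega
  · have := pvFirstBad_lt h
    rw [List.length_eraseIdx, if_pos (by omega)]; omega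

-- ===== PORT B =====
-- B's helper ok(seq): all(a < b <= a+3 for a, b in zip(seq, seq[1:]))
def pvOk (seq : List Int) : Bool :=
  (seq.zip (seq.drop 1)).all (fun p => decide (p.1 < p.2) && decide (p.2 ≤ p.1 + 3))

def is_ascending_alt (numbers : List Int) (used_exception : Bool) : Bool :=
  if used_exception then pvOk numbers
  else if pvOk numbers then true
  else (List.range numbers.length).any (fun i => pvOk (numbers.take i ++ numbers.drop (i + 1)))

-- ===== PRECONDITION & SPEC =====
def Spec_is_ascending (numbers : List Int) (used_exception : Bool) (out : Bool) : Prop := out = is_ascending_alt numbers used_exception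
instance (numbers : List Int) (used_exception : Bool) (out : Bool) : Decidable (Spec_is_ascending numbers used_exception out) := by unfold Spec_is_ascending; infer_instance

-- ===== CLAIM (what is proved, stated in full; the proofs are below) =====
def Claim_equal_is_ascending : Prop := ∀ (numbers : List Int) (used_exception : Bool), Dom_is_ascending numbers used_exception → Spec_is_ascending numbers used_exception (is_ascending numbers used_exception)

-- ===== LEMMAS AND PROOFS =====

theorem pvOk_cons_cons (a b : Int) (t : List Int) :
    pvOk (a :: b :: t) = ((decide (a < b) && decide (b ≤ a + 3)) && pvOk (b :: t)) := by
  simp [pvOk, Bool.and_assoc]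

theorem pvOk_iff (xs : List Int) :
    pvOk xs = true ↔ ∀ j (h : j + 1 < xs.length), xs[j] < xs[j+1] ∧ xs[j+1] ≤ xs[j] + 3 := by
  induction xs with
  | nil => simp [pvOk]
  | cons a xs ih =>
    cases xs with
    | nil => simp [pvOk]
    | cons b t =>
      rw [pvOk_cons_cons]
      constructor
      · intro h j hj
        simp only [Bool.and_eq_true, decide_eq_true_eq] at h
        match j with
        | 0 => exact ⟨h.1.1, h.1.2⟩
        | j + 1 =>
          have := (ih.mp h.2) j (by simpa using hj)
          simpa using this
      · intro h
        simp only [Bool.and_eq_true, decide_eq_true_eq]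
        refine ⟨⟨(h 0 (by simp)).1, (h 0 (by simp)).2⟩, ih.mpr ?_⟩
        intro j hj
        have := h (j + 1) (by simpa using hj)
        simpa using this

theorem pvFirstBad_none (xs : List Int) (h : pvFirstBad xs = none) : pvOk xs = true := by
  induction xs with
  | nil => simp [pvOk]
  | cons a xs ih =>
    cases xs with
    | nil => simp [pvOk]
    | cons b t =>
      simp only [pvFirstBad] at h
      split at h
      · simp at h
      · rename_i hg
        simp only [Option.map_eq_none_iff] at h
        rw [pvOk_cons_cons, ih h]
        simp at hg ⊢
        omega

theorem pvFirstBad_bad {xs : List Int} {idx : Nat} (h : pvFirstBad xs = some idx)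
    (hlt : idx + 1 < xs.length) : ¬(xs[idx] < xs[idx+1] ∧ xs[idx+1] ≤ xs[idx] + 3) := by
  induction xs generalizing idx with
  | nil => simp [pvFirstBad] at h
  | cons a xs ih =>
    cases xs with
    | nil => simp [pvFirstBad] at h
    | cons b t =>
      simp only [pvFirstBad] at h
      split at h
      · rename_i hg
        simp at h
        subst h
        simp at hg ⊢
        omega
      · simp only [Option.map_eq_some_iff] at h
        obtain ⟨j, hj, rfl⟩ := h
        have := ih hj (by simp at hlt ⊢; omega)
        simpa using this

theorem pvFirstBad_some_not_ok {xs : List Int} {idx : Nat} (h : pvFirstBad xs = some idx) :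
    pvOk xs = false := by
  have hlt := pvFirstBad_lt h
  by_contra hc
  have : pvOk xs = true := by revert hc; cases pvOk xs <;> simp
  exact pvFirstBad_bad h hlt ((pvOk_iff xs).mp this idx hlt)

-- A with used_exception = True is exactly the strict check ok.
theorem is_ascending_true_eq_ok (xs : List Int) : is_ascending xs true = pvOk xs := by
  rw [is_ascending]
  cases h : pvFirstBad xs with
  | none => simp [pvFirstBad_none xs h]
  | some idx => simp [pvFirstBad_some_not_ok h]

-- Removing an element away from the first bad pair leaves the bad pair adjacent.
theorem pvOk_erase_other {xs : List Int} {idx i : Nat} (h : pvFirstBad xs = some idx)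
    (hi : i < xs.length) (hne1 : i ≠ idx) (hne2 : i ≠ idx + 1) :
    pvOk (xs.eraseIdx i) = false := by
  have hlt := pvFirstBad_lt h
  by_contra hc
  have hok : pvOk (xs.eraseIdx i) = true := by revert hc; cases pvOk (xs.eraseIdx i) <;> simp
  have hlen : (xs.eraseIdx i).length = xs.length - 1 := by
    simp [List.length_eraseIdx, hi]
  rcases Nat.lt_or_ge i idx with hcase | hcase
  · -- i < idx: pair sits at positions (idx-1, idx) of the erased list
    have hj : (idx - 1) + 1 < (xs.eraseIdx i).length := by omega
    have hp := (pvOk_iff _).mp hok (idx - 1) hj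
    have e1 : (xs.eraseIdx i)[idx - 1] = xs[idx] := by
      rw [List.getElem_eraseIdx_of_ge _ (by omega)]
      congr 1; omega
    have e2 : (xs.eraseIdx i)[(idx - 1) + 1] = xs[idx + 1] := by
      rw [List.getElem_eraseIdx_of_ge _ (by omega)]
      congr 1; omega
    rw [e1, e2] at hp
    exact pvFirstBad_bad h hlt hp
  · -- i > idx + 1: pair still at positions (idx, idx+1)
    have hgt : idx + 1 < i := by omega
    have hj : idx + 1 < (xs.eraseIdx i).length := by omega
    have hp := (pvOk_iff _).mp hok idx hj
    have e1 : (xs.eraseIdx i)[idx] = xs[idx] := by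
      rw [List.getElem_eraseIdx_of_lt _ (by omega)]
    have e2 : (xs.eraseIdx i)[idx + 1] = xs[idx + 1] := by
      rw [List.getElem_eraseIdx_of_lt _ (by omega)]
    rw [e1, e2] at hp
    exact pvFirstBad_bad h hlt hp

-- ===== VERDICT (by name: the statement is the Claim_ definition above) =====
theorem is_ascending_spec : Claim_equal_is_ascending := by
  intro numbers used_exception _
  unfold Spec_is_ascending is_ascending_alt
  rw [is_ascending]
  cases h : pvFirstBad numbers with
  | none =>
    simp [pvFirstBad_none numbers h]
  | some idx =>
    have hlt := pvFirstBad_lt h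
    have hnotok := pvFirstBad_some_not_ok h
    cases used_exception with
    | true => simp [hnotok]
    | false =>
      simp only [Bool.false_eq_true, if_false, hnotok]
      rw [is_ascending_true_eq_ok, is_ascending_true_eq_ok]
      rcases hA : (pvOk (numbers.eraseIdx idx) || pvOk (numbers.eraseIdx (idx + 1)))
        with _ | _
      · -- A says false: no single deletion helps
        symm
        simp only [List.any_eq_false, List.mem_range]
        intro i hi
        rw [← List.eraseIdx_eq_take_drop_succ]
        by_cases h1 : i = idx
        · subst h1; simpa using (Bool.or_eq_false_iff.mp hA).1
        by_cases h2 : i = idx + 1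
        · subst h2; simpa using (Bool.or_eq_false_iff.mp hA).2
        · simp [pvOk_erase_other h hi h1 h2]
      · -- A says true: that deletion is in B's scan
        symm
        simp only [List.any_eq_true, List.mem_range]
        rcases Bool.or_eq_true_iff.mp hA with hgood | hgood
        · exact ⟨idx, by omega, by rw [← List.eraseIdx_eq_take_drop_succ]; exact hgood⟩
        · exact ⟨idx + 1, by omega, by rw [← List.eraseIdx_eq_take_drop_succ]; exact hgood⟩
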